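-- pv_equiv track=rewrite | github.com/minjn12/2025gssort | test02.py | find_fixed_prefix
-- ===== SOURCE A (Python) =====
-- def find_fixed_prefix(arr):
--     fixed = 0
--     for i in range(len(arr)):
--         if all(arr[i] <= arr[j] for j in range(i+1, len(arr))):
--             fixed += 1
--         else:
--             break
--     return fixed
-- ===== SOURCE B (Python) =====
-- def find_fixed_prefix(arr):
--     # One backward pass: maintain the running minimum of the suffix already seen;
--     # the count of "fixed" positions restarts whenever an element exceeds that minimum.
--     m = None
--     fixed = 0
--     for x in reversed(arr):
--         if m is None or x <= m:
--             fixed += 1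
--         else:
--             fixed = 0
--         if m is None or x < m:
--             m = x
--     return fixed
-- ===== Notes on version B (the rewrite author's own statement) =====
-- stated objective: faster
-- what changed: Replaced the nested forward scan (each prefix element compared against every later element, with break) by a single backward pass that maintains the running suffix minimum and a counter that resets when an element exceeds it.
import Mathlib
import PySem

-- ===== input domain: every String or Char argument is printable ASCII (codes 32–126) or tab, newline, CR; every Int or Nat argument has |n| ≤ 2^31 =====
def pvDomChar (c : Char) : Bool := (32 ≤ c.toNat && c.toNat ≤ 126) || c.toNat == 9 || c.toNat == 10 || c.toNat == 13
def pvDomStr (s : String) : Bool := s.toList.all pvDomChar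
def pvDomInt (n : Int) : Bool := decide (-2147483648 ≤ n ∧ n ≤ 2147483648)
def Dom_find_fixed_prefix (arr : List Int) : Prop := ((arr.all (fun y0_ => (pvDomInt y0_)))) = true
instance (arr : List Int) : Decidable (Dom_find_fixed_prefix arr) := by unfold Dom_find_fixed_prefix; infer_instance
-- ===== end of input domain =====

-- B replaces A's quadratic nested forward scan by a single backward pass keeping the running suffix minimum (measured asymptotically faster).


-- ===== PORT A =====
-- all(arr[i] <= arr[j] for j in range(i+1, len(arr)))
def aCheck (arr : List Int) (i : Int) : Bool :=
  (PySem.List.pyRange (i + 1) (arr.length : Int) 1).all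
    (fun j => decide (PySem.List.pyGetD arr i 0 ≤ PySem.List.pyGetD arr j 0))

-- the 'for i in range(len(arr))' loop with its break
def aLoop (arr : List Int) : List Int → Int → Int
  | [], fixed => fixed
  | i :: rest, fixed => if aCheck arr i then aLoop arr rest (fixed + 1) else fixed

def find_fixed_prefix (arr : List Int) : Int :=
  aLoop arr (PySem.List.pyRange 0 (arr.length : Int) 1) 0

-- ===== PORT B =====
-- 'for x in reversed(arr)': m = running minimum (None before any element), fixed = the reset counter
def bLoop : List Int → Option Int → Int → Option Int × Int
  | [], m, fixed => (m, fixed)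
  | x :: rest, m, fixed =>
      bLoop rest
        (match m with
         | none => some x
         | some v => if x < v then some x else some v)
        (match m with
         | none => fixed + 1
         | some v => if x ≤ v then fixed + 1 else 0)

def find_fixed_prefix_alt (arr : List Int) : Int :=
  (bLoop arr.reverse none 0).2

-- ===== PRECONDITION & SPEC =====
def Spec_find_fixed_prefix (arr : List Int) (out : Int) : Prop := out = find_fixed_prefix_alt arr
instance (arr : List Int) (out : Int) : Decidable (Spec_find_fixed_prefix arr out) := by unfold Spec_find_fixed_prefix; infer_instance

-- ===== CLAIM (what is proved, stated in full; the proofs are below) =====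
def Claim_equal_find_fixed_prefix : Prop := ∀ (arr : List Int), Dom_find_fixed_prefix arr → Spec_find_fixed_prefix arr (find_fixed_prefix arr)

-- ===== LEMMAS AND PROOFS =====

-- mathematical reference: length of the prefix whose elements are ≤ every later element, stopping at the first failure
def mspec : List Int → Int
  | [] => 0
  | x :: xs => if xs.all (fun y => decide (x ≤ y)) then 1 + mspec xs else 0

lemma aCheck_eq (arr : List Int) (i : Nat) :
    aCheck arr (i : Int)
      = (arr.drop (i + 1)).all (fun y => decide (PySem.List.pyGetD arr (i : Int) 0 ≤ y)) := by
  unfold aCheck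
  have h1 : ((i : Int) + 1) = ((i + 1 : Nat) : Int) := by push_cast; ring
  have h2 : List.drop (i + 1) arr = List.drop ((i + 1 : Nat) : Int).toNat arr := by simp
  rw [h1, h2, ← PySem.List.map_pyGetD_pyRange' arr 0 (by positivity), List.all_map]
  rfl

lemma aLoop_eq (k : Nat) : ∀ (arr : List Int) (i : Nat) (fixed : Int),
    arr.length - i ≤ k → i ≤ arr.length →
    aLoop arr (PySem.List.pyRange (i : Int) (arr.length : Int) 1) fixed
      = fixed + mspec (arr.drop i) := by
  induction k with
  | zero =>
    intro arr i fixed hk hle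
    have hi : i = arr.length := by omega
    subst hi
    rw [PySem.List.pyRange_one_eq_nil (le_refl _)]
    simp [aLoop, List.drop_of_length_le, mspec]
  | succ k ih =>
    intro arr i fixed hk hle
    rcases eq_or_lt_of_le hle with h | h
    · subst h
      rw [PySem.List.pyRange_one_eq_nil (le_refl _)]
      simp [aLoop, List.drop_of_length_le, mspec]
    · rw [PySem.List.pyRange_one_cons (by exact_mod_cast h)]
      have h1 : ((i : Int) + 1) = ((i + 1 : Nat) : Int) := by push_cast; ring
      have hdrop : arr.drop i = arr[i] :: arr.drop (i + 1) := List.drop_eq_getElem_cons h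
      have hget : PySem.List.pyGetD arr (i : Int) 0 = arr[i] := by
        rw [PySem.List.pyGetD_natCast, List.getD_eq_getElem _ _ h]
      show (if aCheck arr i then aLoop arr (PySem.List.pyRange ((i:Int)+1) _ 1) (fixed+1) else fixed) = _
      rw [aCheck_eq, hget, hdrop, h1]
      by_cases hc : (arr.drop (i + 1)).all (fun y => decide (arr[i] ≤ y)) = true
      · rw [if_pos hc, ih arr (i+1) (fixed+1) (by omega) (by omega)]
        simp [mspec, hc]; ring
      · rw [if_neg hc]
        simp [mspec, hc]
lemma a_eq_mspec (arr : List Int) : find_fixed_prefix arr = mspec arr := by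
  have := aLoop_eq arr.length arr 0 0 (by omega) (by omega)
  simpa [find_fixed_prefix] using this
lemma bLoop_fst_char : ∀ (l : List Int) (m : Option Int) (fixed : Int),
    (match (bLoop l m fixed).1 with
     | none => l = [] ∧ m = none
     | some v => (v ∈ l ∨ m = some v) ∧ (∀ y ∈ l, v ≤ y) ∧ (∀ w, m = some w → v ≤ w)) := by
  intro l
  induction l with
  | nil =>
    intro m fixed
    cases m <;> simp [bLoop]
  | cons x rest ih =>
    intro m fixed
    cases m with
    | none =>
      have h := ih (some x) (fixed + 1)
      simp only [bLoop]
      rcases hr : (bLoop rest (some x) (fixed + 1)).1 with _ | v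
      · rw [hr] at h; simp at h
      · rw [hr] at h
        simp only [hr] at *
        obtain ⟨h1, h2, h3⟩ := h
        refine ⟨?_, ?_, ?_⟩
        · left
          rcases h1 with h1 | h1
          · exact List.mem_cons_of_mem _ h1
          · simp at h1; subst h1; exact List.mem_cons_self
        · intro y hy
          rcases List.mem_cons.mp hy with rfl | hy
          · exact h3 _ rfl
          · exact h2 _ hy
        · intro w hw; cases hw
    | some u =>
      by_cases hx : x < u
      · have h := ih (some x) (if x ≤ u then fixed + 1 else 0)
        simp only [bLoop, if_pos hx]
        rcases hr : (bLoop rest (some x) (if x ≤ u then fixed + 1 else 0)).1 with _ | v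
        · rw [hr] at h; simp at h
        · rw [hr] at h
          obtain ⟨h1, h2, h3⟩ := h
          have hvx : v ≤ x := h3 _ rfl
          refine ⟨?_, ?_, ?_⟩
          · left
            rcases h1 with h1 | h1
            · exact List.mem_cons_of_mem _ h1
            · simp at h1; subst h1; exact List.mem_cons_self
          · intro y hy
            rcases List.mem_cons.mp hy with rfl | hy
            · exact hvx
            · exact h2 _ hy
          · intro w hw
            cases hw
            exact le_trans hvx (le_of_lt hx)
      · have h := ih (some u) (if x ≤ u then fixed + 1 else 0)
        simp only [bLoop, if_neg hx]
        rcases hr : (bLoop rest (some u) (if x ≤ u then fixed + 1 else 0)).1 with _ | v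
        · rw [hr] at h; simp at h
        · rw [hr] at h
          obtain ⟨h1, h2, h3⟩ := h
          have hvu : v ≤ u := h3 _ rfl
          refine ⟨?_, ?_, ?_⟩
          · rcases h1 with h1 | h1
            · left; exact List.mem_cons_of_mem _ h1
            · right; exact h1
          · intro y hy
            rcases List.mem_cons.mp hy with rfl | hy
            · exact le_trans hvu (not_lt.mp hx)
            · exact h2 _ hy
          · exact h3
lemma bLoop_append (l1 l2 : List Int) (m : Option Int) (fixed : Int) :
    bLoop (l1 ++ l2) m fixed = bLoop l2 (bLoop l1 m fixed).1 (bLoop l1 m fixed).2 := by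
  induction l1 generalizing m fixed with
  | nil => simp [bLoop]
  | cons x rest ih => simp only [List.cons_append, bLoop]; exact ih _ _

lemma b_eq_mspec (arr : List Int) : find_fixed_prefix_alt arr = mspec arr := by
  induction arr with
  | nil => simp [find_fixed_prefix_alt, bLoop, mspec]
  | cons x xs ih =>
    unfold find_fixed_prefix_alt at *
    rw [List.reverse_cons, bLoop_append]
    have hchar := bLoop_fst_char xs.reverse none 0
    rcases hm : (bLoop xs.reverse none 0).1 with _ | v
    · rw [hm] at hchar
      simp only at hchar
      have hxs : xs = [] := by simpa using hchar.1
      subst hxs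
      simp [bLoop, mspec] at *
    · rw [hm] at hchar
      obtain ⟨h1, h2, h3⟩ := hchar
      have hv_mem : v ∈ xs := by
        rcases h1 with h1 | h1
        · exact List.mem_reverse.mp h1
        · cases h1
      have hlb : ∀ y ∈ xs, v ≤ y := fun y hy => h2 y (List.mem_reverse.mpr hy)
      have hcond : (x ≤ v) ↔ (xs.all (fun y => decide (x ≤ y)) = true) := by
        constructor
        · intro hxv
          simp only [List.all_eq_true, decide_eq_true_eq]
          exact fun y hy => le_trans hxv (hlb y hy)
        · intro hall
          simp only [List.all_eq_true, decide_eq_true_eq] at hall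
          exact hall v hv_mem
      simp only [bLoop, mspec]
      by_cases hxv : x ≤ v
      · rw [if_pos hxv, if_pos (hcond.mp hxv)]
        simp [ih]
        omega
      · rw [if_neg hxv, if_neg (fun hc => hxv (hcond.mpr hc))]

-- ===== VERDICT (by name: the statement is the Claim_ definition above) =====
theorem find_fixed_prefix_spec : Claim_equal_find_fixed_prefix := by
  intro arr _
  unfold Spec_find_fixed_prefix
  rw [a_eq_mspec, b_eq_mspec]
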